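-- pv_equiv track=rewrite | github.com/julesjabbour/morphlex-pipeline | analyzers/turkish.py | _parse_morphemes
-- ===== SOURCE A (Python) =====
-- def _parse_morphemes(morphemes: list) -> dict:
--     """
--     Parse Zeyrek morphemes list into structured morphological features.
--
--     Args:
--         morphemes: List of morpheme tags from Zeyrek
--
--     Returns:
--         Dict of structured morphological features
--     """
--     features = {}
--
--     # Mapping of Zeyrek morpheme tags to feature categories
--     tense_tags = {'Past', 'Pres', 'Fut', 'Aor', 'Prog1', 'Prog2', 'Narr', 'Cond'}
--     person_tags = {'A1sg', 'A2sg', 'A3sg', 'A1pl', 'A2pl', 'A3pl'}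
--     number_tags = {'Sing', 'Plur'}
--     case_tags = {'Nom', 'Acc', 'Dat', 'Loc', 'Abl', 'Gen', 'Ins', 'Equ'}
--     polarity_tags = {'Pos', 'Neg'}
--     voice_tags = {'Pass', 'Caus', 'Recip', 'Reflex'}
--     mood_tags = {'Imp', 'Opt', 'Neces', 'Desr'}
--     aspect_tags = {'Perf', 'Prog', 'Hab'}
--
--     for morpheme in morphemes:
--         tag = str(morpheme)
--         if tag in tense_tags:
--             features['tense'] = tag
--         elif tag in person_tags:
--             features['person'] = tag
--         elif tag in number_tags:
--             features['number'] = tag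
--         elif tag in case_tags:
--             features['case'] = tag
--         elif tag in polarity_tags:
--             features['polarity'] = tag
--         elif tag in voice_tags:
--             features['voice'] = tag
--         elif tag in mood_tags:
--             features['mood'] = tag
--         elif tag in aspect_tags:
--             features['aspect'] = tag
--
--     return features
-- ===== SOURCE B (Python) =====
-- # Different decomposition: compute key order (first occurrence of each category)
-- # and values (last matching tag, found by a backward first-wins scan) in separate
-- # staged passes, then assemble the dict; no per-morpheme branch cascade.
-- _CATEGORY_TAGS = [
--     ('tense', {'Past', 'Pres', 'Fut', 'Aor', 'Prog1', 'Prog2', 'Narr', 'Cond'}),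
--     ('person', {'A1sg', 'A2sg', 'A3sg', 'A1pl', 'A2pl', 'A3pl'}),
--     ('number', {'Sing', 'Plur'}),
--     ('case', {'Nom', 'Acc', 'Dat', 'Loc', 'Abl', 'Gen', 'Ins', 'Equ'}),
--     ('polarity', {'Pos', 'Neg'}),
--     ('voice', {'Pass', 'Caus', 'Recip', 'Reflex'}),
--     ('mood', {'Imp', 'Opt', 'Neces', 'Desr'}),
--     ('aspect', {'Perf', 'Prog', 'Hab'}),
-- ]
-- # The eight tag sets are disjoint, so this inverted table loses nothing.
-- _TAG_TO_CATEGORY = {t: c for c, ts in _CATEGORY_TAGS for t in ts}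
--
--
-- def _parse_morphemes(morphemes: list) -> dict:
--     tags = [str(m) for m in morphemes]
--     # Key order of the result: first occurrence of each category.
--     cats = [_TAG_TO_CATEGORY[t] for t in tags if t in _TAG_TO_CATEGORY]
--     order = list(dict.fromkeys(cats))
--     # Value per category: the last matching tag = first hit scanning backwards.
--     last = {}
--     for t in reversed(tags):
--         c = _TAG_TO_CATEGORY.get(t)
--         if c is not None and c not in last:
--             last[c] = t
--     return {c: last[c] for c in order}
-- ===== Notes on version B (the rewrite author's own statement) =====
-- stated objective: alternative
-- what changed: Instead of one pass mutating a features dict through an eight-branch elif cascade, B computes the result's key order (ordered dedup of the category sequence) and its values (last matching tag per category, via a backward first-wins scan over the reversed list) in separate staged passes over an inverted tag-to-category table, then assembles the dict from those two pieces.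
import Mathlib
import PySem

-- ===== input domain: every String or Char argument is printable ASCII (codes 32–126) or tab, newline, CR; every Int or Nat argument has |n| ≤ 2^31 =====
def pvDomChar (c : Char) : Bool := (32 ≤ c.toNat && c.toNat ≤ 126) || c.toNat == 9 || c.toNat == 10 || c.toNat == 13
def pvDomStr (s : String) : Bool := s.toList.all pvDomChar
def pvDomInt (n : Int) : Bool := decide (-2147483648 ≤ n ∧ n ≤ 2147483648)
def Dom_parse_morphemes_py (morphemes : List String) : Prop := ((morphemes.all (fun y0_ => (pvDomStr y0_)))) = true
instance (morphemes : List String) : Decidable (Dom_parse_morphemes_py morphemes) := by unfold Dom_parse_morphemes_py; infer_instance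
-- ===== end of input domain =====

-- B replaces A's single mutating pass with the eight-branch elif cascade by staged passes over an
-- inverted tag->category table: the key order (ordered dedup of the category sequence) and the values
-- (last matching tag per category, by a backward first-wins scan) are computed separately, then assembled.

-- ===== PORT A =====
def pvTenseTags : PySem.Set String := PySem.Set.ofList ["Past", "Pres", "Fut", "Aor", "Prog1", "Prog2", "Narr", "Cond"]
def pvPersonTags : PySem.Set String := PySem.Set.ofList ["A1sg", "A2sg", "A3sg", "A1pl", "A2pl", "A3pl"]
def pvNumberTags : PySem.Set String := PySem.Set.ofList ["Sing", "Plur"]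
def pvCaseTags : PySem.Set String := PySem.Set.ofList ["Nom", "Acc", "Dat", "Loc", "Abl", "Gen", "Ins", "Equ"]
def pvPolarityTags : PySem.Set String := PySem.Set.ofList ["Pos", "Neg"]
def pvVoiceTags : PySem.Set String := PySem.Set.ofList ["Pass", "Caus", "Recip", "Reflex"]
def pvMoodTags : PySem.Set String := PySem.Set.ofList ["Imp", "Opt", "Neces", "Desr"]
def pvAspectTags : PySem.Set String := PySem.Set.ofList ["Perf", "Prog", "Hab"]

def pvStepA (features : PySem.Dict String String) (morpheme : String) : PySem.Dict String String :=
  let tag := morpheme  -- str(morpheme) on a string is the string itself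
  if PySem.Set.contains pvTenseTags tag then features.insert "tense" tag
  else if PySem.Set.contains pvPersonTags tag then features.insert "person" tag
  else if PySem.Set.contains pvNumberTags tag then features.insert "number" tag
  else if PySem.Set.contains pvCaseTags tag then features.insert "case" tag
  else if PySem.Set.contains pvPolarityTags tag then features.insert "polarity" tag
  else if PySem.Set.contains pvVoiceTags tag then features.insert "voice" tag
  else if PySem.Set.contains pvMoodTags tag then features.insert "mood" tag
  else if PySem.Set.contains pvAspectTags tag then features.insert "aspect" tag
  else features

def parse_morphemes_py (morphemes : List String) : List (String × String) :=
  (morphemes.foldl pvStepA PySem.Dict.empty).items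

-- ===== PORT B =====
-- the inverted table _TAG_TO_CATEGORY (the eight tag sets are pairwise disjoint, keys distinct)
def pvTag2Cat : PySem.Dict String String := PySem.Dict.ofList
  [("Past", "tense"), ("Pres", "tense"), ("Fut", "tense"), ("Aor", "tense"),
   ("Prog1", "tense"), ("Prog2", "tense"), ("Narr", "tense"), ("Cond", "tense"),
   ("A1sg", "person"), ("A2sg", "person"), ("A3sg", "person"),
   ("A1pl", "person"), ("A2pl", "person"), ("A3pl", "person"),
   ("Sing", "number"), ("Plur", "number"),
   ("Nom", "case"), ("Acc", "case"), ("Dat", "case"), ("Loc", "case"),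
   ("Abl", "case"), ("Gen", "case"), ("Ins", "case"), ("Equ", "case"),
   ("Pos", "polarity"), ("Neg", "polarity"),
   ("Pass", "voice"), ("Caus", "voice"), ("Recip", "voice"), ("Reflex", "voice"),
   ("Imp", "mood"), ("Opt", "mood"), ("Neces", "mood"), ("Desr", "mood"),
   ("Perf", "aspect"), ("Prog", "aspect"), ("Hab", "aspect")]

-- 'for t in reversed(tags): c = _TAG_TO_CATEGORY.get(t); if c is not None and c not in last: last[c] = t'
def pvRevStep (last : PySem.Dict String String) (t : String) : PySem.Dict String String :=
  match pvTag2Cat.get? t with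
  | some c => if last.contains c then last else last.insert c t
  | none => last

def parse_morphemes_py_alt (morphemes : List String) : List (String × String) :=
  let tags := morphemes
  -- '[_TAG_TO_CATEGORY[t] for t in tags if t in _TAG_TO_CATEGORY]' (lookup of a guarded-present key = get?)
  let cats := tags.filterMap (fun t => pvTag2Cat.get? t)
  let order := PySem.List.dedup cats
  let last := tags.reverse.foldl pvRevStep PySem.Dict.empty
  -- '{c: last[c] for c in order}': every c in order is a key of last, so the getD default is unreachable
  (order.foldl (fun d c => d.insert c (last.getD c "")) PySem.Dict.empty).items

-- ===== PRECONDITION & SPEC =====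
def Spec_parse_morphemes_py (morphemes : List String) (out : List (String × String)) : Prop := out = parse_morphemes_py_alt morphemes
instance (morphemes : List String) (out : List (String × String)) : Decidable (Spec_parse_morphemes_py morphemes out) := by unfold Spec_parse_morphemes_py; infer_instance

-- ===== CLAIM (what is proved, stated in full; the proofs are below) =====
def Claim_equal_parse_morphemes_py : Prop := ∀ (morphemes : List String), Dom_parse_morphemes_py morphemes → Spec_parse_morphemes_py morphemes (parse_morphemes_py morphemes)

-- ===== LEMMAS AND PROOFS =====

set_option maxRecDepth 2000000

-- A's branch cascade, rewritten through the inverted table (proof-side only)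
def pvStepGen (features : PySem.Dict String String) (t : String) : PySem.Dict String String :=
  match pvTag2Cat.get? t with
  | some c => features.insert c t
  | none => features

lemma pvKeys : pvTag2Cat.keys = ["Past", "Pres", "Fut", "Aor", "Prog1", "Prog2", "Narr", "Cond", "A1sg", "A2sg", "A3sg", "A1pl", "A2pl", "A3pl", "Sing", "Plur", "Nom", "Acc", "Dat", "Loc", "Abl", "Gen", "Ins", "Equ", "Pos", "Neg", "Pass", "Caus", "Recip", "Reflex", "Imp", "Opt", "Neces", "Desr", "Perf", "Prog", "Hab"] := by decide

lemma pvT1 : pvTenseTags = ["Past", "Pres", "Fut", "Aor", "Prog1", "Prog2", "Narr", "Cond"] := by decide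
lemma pvT2 : pvPersonTags = ["A1sg", "A2sg", "A3sg", "A1pl", "A2pl", "A3pl"] := by decide
lemma pvT3 : pvNumberTags = ["Sing", "Plur"] := by decide
lemma pvT4 : pvCaseTags = ["Nom", "Acc", "Dat", "Loc", "Abl", "Gen", "Ins", "Equ"] := by decide
lemma pvT5 : pvPolarityTags = ["Pos", "Neg"] := by decide
lemma pvT6 : pvVoiceTags = ["Pass", "Caus", "Recip", "Reflex"] := by decide
lemma pvT7 : pvMoodTags = ["Imp", "Opt", "Neces", "Desr"] := by decide
lemma pvT8 : pvAspectTags = ["Perf", "Prog", "Hab"] := by decide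

-- per-morpheme step: A's eight-branch cascade equals the single table lookup
lemma pvStepA_eq_gen (d : PySem.Dict String String) (t : String) : pvStepA d t = pvStepGen d t := by
  by_cases h : t ∈ (["Past", "Pres", "Fut", "Aor", "Prog1", "Prog2", "Narr", "Cond", "A1sg", "A2sg", "A3sg", "A1pl", "A2pl", "A3pl", "Sing", "Plur", "Nom", "Acc", "Dat", "Loc", "Abl", "Gen", "Ins", "Equ", "Pos", "Neg", "Pass", "Caus", "Recip", "Reflex", "Imp", "Opt", "Neces", "Desr", "Perf", "Prog", "Hab"] : List String)
  · fin_cases h <;> rfl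
  · have hg : pvTag2Cat.get? t = none := by
      rw [PySem.Dict.get?_eq_none_iff_not_mem_keys, pvKeys]
      exact h
    have hc : ∀ (s : PySem.Set String), (∀ x ∈ s, x ∈ (["Past", "Pres", "Fut", "Aor", "Prog1", "Prog2", "Narr", "Cond", "A1sg", "A2sg", "A3sg", "A1pl", "A2pl", "A3pl", "Sing", "Plur", "Nom", "Acc", "Dat", "Loc", "Abl", "Gen", "Ins", "Equ", "Pos", "Neg", "Pass", "Caus", "Recip", "Reflex", "Imp", "Opt", "Neces", "Desr", "Perf", "Prog", "Hab"] : List String)) → PySem.Set.contains s t = false := by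
      intro s hs
      by_contra hb
      exact h (hs t ((PySem.Set.contains_iff s t).mp (by revert hb; cases PySem.Set.contains s t <;> simp)))
    simp only [pvStepA,
      hc pvTenseTags (by rw [pvT1]; decide),
      hc pvPersonTags (by rw [pvT2]; decide),
      hc pvNumberTags (by rw [pvT3]; decide),
      hc pvCaseTags (by rw [pvT4]; decide),
      hc pvPolarityTags (by rw [pvT5]; decide),
      hc pvVoiceTags (by rw [pvT6]; decide),
      hc pvMoodTags (by rw [pvT7]; decide),
      hc pvAspectTags (by rw [pvT8]; decide)]
    unfold pvStepGen
    rw [hg]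
    simp

lemma pvRevStep_none (d : PySem.Dict String String) (t : String) (h : pvTag2Cat.get? t = none) :
    pvRevStep d t = d := by
  unfold pvRevStep; rw [h]

lemma pvRevStep_some (d : PySem.Dict String String) (t c : String) (h : pvTag2Cat.get? t = some c) :
    pvRevStep d t = if d.contains c then d else d.insert c t := by
  unfold pvRevStep; rw [h]

lemma pvStepGen_none (d : PySem.Dict String String) (t : String) (h : pvTag2Cat.get? t = none) :
    pvStepGen d t = d := by
  unfold pvStepGen; rw [h]

lemma pvStepGen_some (d : PySem.Dict String String) (t c : String) (h : pvTag2Cat.get? t = some c) :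
    pvStepGen d t = d.insert c t := by
  unfold pvStepGen; rw [h]

-- backward first-wins scan: the starting dict wins over whatever the rest of the scan adds
lemma pvRev_get (m : List String) (d : PySem.Dict String String) (k : String) :
    ((m.foldl pvRevStep d).get? k) = ((d.get? k).or ((m.foldl pvRevStep PySem.Dict.empty).get? k)) := by
  induction m generalizing d with
  | nil => simp [PySem.Dict.get?_empty]
  | cons t m' ih =>
    simp only [List.foldl_cons]
    rw [ih (pvRevStep d t), ih (pvRevStep PySem.Dict.empty t)]
    cases hco : pvTag2Cat.get? t with
    | none =>
      rw [pvRevStep_none _ _ hco, pvRevStep_none _ _ hco]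
      simp [PySem.Dict.get?_empty]
    | some c =>
      rw [pvRevStep_some _ _ _ hco, pvRevStep_some _ _ _ hco,
        PySem.Dict.contains_empty]
      simp only [Bool.false_eq_true, if_false]
      by_cases hk : k = c
      · subst hk
        cases hdc : PySem.Dict.contains d k with
        | true =>
          have hs : (d.get? k).isSome := by
            rw [← PySem.Dict.contains_eq_isSome_get?]; exact hdc
          rcases Option.isSome_iff_exists.mp hs with ⟨v, hv⟩
          simp [hv]
        | false =>
          have hdn : d.get? k = none := (PySem.Dict.get?_eq_none_iff_contains d k).mpr hdc
          simp [hdn]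
      · have h1 : (PySem.Dict.insert PySem.Dict.empty c t).get? k = none := by
          rw [PySem.Dict.get?_insert_of_ne _ _ hk, PySem.Dict.get?_empty]
        cases hdc : PySem.Dict.contains d c with
        | true => simp [h1]
        | false => simp [h1, PySem.Dict.get?_insert_of_ne _ _ hk]

-- the value the backward scan assigns to each category after one more (front) element
lemma pvVal (l : List String) (x c k : String) (hx : pvTag2Cat.get? x = some c) :
    ((x :: l).foldl pvRevStep PySem.Dict.empty).getD k "" =
      if k = c then x else (l.foldl pvRevStep PySem.Dict.empty).getD k "" := by
  have h0 : pvRevStep PySem.Dict.empty x = PySem.Dict.empty.insert c x := by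
    rw [pvRevStep_some _ _ _ hx, PySem.Dict.contains_empty]
    simp
  rw [List.foldl_cons, h0, PySem.Dict.getD_eq_get?_getD, pvRev_get,
    PySem.Dict.get?_insert]
  by_cases hk : k = c
  · simp [hk]
  · simp [hk, PySem.Dict.getD_eq_get?_getD]

-- the central invariant: A's dict after l IS B's assembled result on l
lemma pvMain (l : List String) :
    (l.foldl pvStepGen PySem.Dict.empty).items =
      (PySem.List.dedup (l.filterMap (fun t => pvTag2Cat.get? t))).map
        (fun c => (c, (l.reverse.foldl pvRevStep PySem.Dict.empty).getD c "")) := by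
  induction l using List.reverseRecOn with
  | nil => rfl
  | append_singleton l x ih =>
    rw [List.foldl_append, List.foldl_cons, List.foldl_nil,
      List.filterMap_append, List.reverse_append]
    simp only [List.reverse_cons, List.reverse_nil, List.nil_append, List.singleton_append,
      List.filterMap_cons, List.filterMap_nil]
    cases hx : pvTag2Cat.get? x with
    | none =>
      rw [pvStepGen_none _ _ hx, List.foldl_cons, pvRevStep_none _ _ hx]
      simp only [List.append_nil]
      exact ih
    | some c =>
      rw [pvStepGen_some _ _ _ hx]
      have hkeys : (l.foldl pvStepGen PySem.Dict.empty).keys =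
          PySem.List.dedup (l.filterMap (fun t => pvTag2Cat.get? t)) := by
        simp only [PySem.Dict.keys, ih, List.map_map]
        simp [Function.comp_def]
      have hmemkeys : ((l.foldl pvStepGen PySem.Dict.empty).contains c = true) ↔
          c ∈ l.filterMap (fun t => pvTag2Cat.get? t) := by
        rw [PySem.Dict.contains_iff_mem_keys, hkeys, PySem.List.dedup_eq_ofList,
          PySem.Set.mem_ofList]
      have hdd : PySem.List.dedup (l.filterMap (fun t => pvTag2Cat.get? t) ++ [c]) =
          if c ∈ l.filterMap (fun t => pvTag2Cat.get? t)
          then PySem.List.dedup (l.filterMap (fun t => pvTag2Cat.get? t))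
          else PySem.List.dedup (l.filterMap (fun t => pvTag2Cat.get? t)) ++ [c] := by
        rw [PySem.List.dedup_eq_ofList, PySem.Set.ofList_append_singleton,
          PySem.Set.add_eq_ite, PySem.List.dedup_eq_ofList]
        simp [PySem.Set.mem_ofList]
      by_cases hc : c ∈ l.filterMap (fun t => pvTag2Cat.get? t)
      · rw [PySem.Dict.items_insert_of_contains _ _ (hmemkeys.mpr hc), ih, hdd, if_pos hc,
          List.map_map]
        apply List.map_congr_left
        intro a ha
        rw [pvVal l.reverse x c a hx]
        have hbeq : (a == c) = decide (a = c) := by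
          cases hd : decide (a = c) <;> simp_all
        by_cases hac : a = c
        · subst hac; simp
        · simp only [Function.comp_def, hbeq, decide_eq_false hac, Bool.false_eq_true,
            if_false]
          rw [if_neg hac]
      · have hnc : (l.foldl pvStepGen PySem.Dict.empty).contains c = false := by
          cases hh : (l.foldl pvStepGen PySem.Dict.empty).contains c
          · rfl
          · exact absurd (hmemkeys.mp hh) hc
        rw [PySem.Dict.items_insert_of_not_contains _ _ hnc, ih, hdd, if_neg hc,
          List.map_append]
        refine congrArg₂ (· ++ ·) ?_ ?_
        · apply List.map_congr_left
          intro a ha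
          rw [pvVal l.reverse x c a hx]
          have hac : a ≠ c := by
            intro h; subst h
            exact hc ((PySem.Set.mem_ofList _ _).mp (by rw [← PySem.List.dedup_eq_ofList]; exact ha))
          simp [hac]
        · simp only [List.map_cons, List.map_nil]
          rw [pvVal l.reverse x c c hx]
          simp

-- ===== VERDICT (by name: the statement is the Claim_ definition above) =====
theorem parse_morphemes_py_spec : Claim_equal_parse_morphemes_py := by
  intro morphemes _
  unfold Spec_parse_morphemes_py parse_morphemes_py parse_morphemes_py_alt
  rw [PySem.List.foldl_congr_mem morphemes pvStepA pvStepGen PySem.Dict.empty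
    (fun acc x _ => pvStepA_eq_gen acc x)]
  rw [pvMain]
  rw [PySem.Dict.items_foldl_insert_fresh
    (PySem.List.dedup (morphemes.filterMap (fun t => pvTag2Cat.get? t)))
    (fun a => a) (fun a => (morphemes.reverse.foldl pvRevStep PySem.Dict.empty).getD a "")
    PySem.Dict.empty
    (fun a _ => PySem.Dict.contains_empty a)
    (by simp only [List.map_id_fun', id]; exact PySem.List.nodup_dedup (morphemes.filterMap (fun t => pvTag2Cat.get? t)))]
  simp [PySem.Dict.empty]
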